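-- pv_equiv track=rewrite | github.com/mostgood1/NCAAB | src/ncaab_model/data/team_normalize.py | _strip_mascot
-- ===== SOURCE A (Python) =====
-- from typing import Set, Dict
--
-- _MASCOT_COMMON = {
--     "bulldogs","tigers","wildcats","cougars","lions","bears","wolfpack","cardinals","raiders",
--     "hawks","eagles","owls","broncos","spartans","gators","rams","badgers","crimson tide","orange",
--     "rebels","aggies","aztecs","shockers","sun devils","demon deacons","blue devils","tar heels",
--     "seminoles","longhorns","horned frogs","mountaineers","golden gophers","golden bears","golden eagles",
-- }
--
-- def _strip_mascot(tokens: list[str]) -> Set[str]: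
--     out = set()
--     # Remove trailing multi-token mascots first
--     joined = " ".join(tokens)
--     for masc in sorted(_MASCOT_COMMON, key=len, reverse=True):
--         if joined.endswith(" "+masc) or joined == masc:
--             core = joined[: -len(masc)].strip()
--             if core:
--                 out.add(core)
--     # Single token removal
--     if tokens and tokens[-1] in _MASCOT_COMMON:
--         out.add(" ".join(tokens[:-1]))
--     return out
-- ===== SOURCE B (Python) =====
-- _MASCOT_COMMON = {
--     "bulldogs","tigers","wildcats","cougars","lions","bears","wolfpack","cardinals","raiders",
--     "hawks","eagles","owls","broncos","spartans","gators","rams","badgers","crimson tide","orange",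
--     "rebels","aggies","aztecs","shockers","sun devils","demon deacons","blue devils","tar heels",
--     "seminoles","longhorns","horned frogs","mountaineers","golden gophers","golden bears","golden eagles",
-- }
--
-- _MASCOT_MAXLEN = max(map(len, _MASCOT_COMMON))
--
-- def _strip_mascot(tokens):
--     # Scan the word boundaries of the joined string and set-test the trailing
--     # substring after each one, instead of suffix-testing every known mascot.
--     # A trailing substring longer than the longest mascot can never match.
--     out = set()
--     joined = " ".join(tokens)
--     n = len(joined)
--     for p in range(n):
--         if joined[p] == " " and n - p - 1 <= _MASCOT_MAXLEN and joined[p + 1:] in _MASCOT_COMMON: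
--             core = joined[:p + 1].strip()
--             if core:
--                 out.add(core)
--     if tokens and tokens[-1] in _MASCOT_COMMON:
--         out.add(" ".join(tokens[:-1]))
--     return out
-- ===== Notes on version B (the rewrite author's own statement) =====
-- stated objective: alternative
-- what changed: B drops A's length-sorted loop over all 34 mascots with per-mascot endswith tests and instead makes one left-to-right scan over the space positions of the joined string, set-testing the trailing substring after a space whenever it is no longer than the longest mascot.
import Mathlib
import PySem

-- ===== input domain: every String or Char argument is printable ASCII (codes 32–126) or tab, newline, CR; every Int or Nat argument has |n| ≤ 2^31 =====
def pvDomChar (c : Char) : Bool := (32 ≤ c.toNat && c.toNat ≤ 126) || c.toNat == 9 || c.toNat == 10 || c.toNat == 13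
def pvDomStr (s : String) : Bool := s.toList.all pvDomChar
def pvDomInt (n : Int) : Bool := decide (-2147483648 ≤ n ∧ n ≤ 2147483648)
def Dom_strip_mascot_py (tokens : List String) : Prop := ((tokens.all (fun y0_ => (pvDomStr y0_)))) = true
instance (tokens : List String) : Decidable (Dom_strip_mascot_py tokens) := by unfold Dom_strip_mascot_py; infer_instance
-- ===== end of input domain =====

-- B replaces A's length-sorted loop over all mascots (endswith each) by one scan of the
-- space positions of the joined string with a set lookup of the trailing substring (alternative decomposition; return-value equivalence).

-- shared module constant _MASCOT_COMMON (a Python set literal, insertion order)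
def pvMascots : PySem.Set String := PySem.Set.ofList
  ["bulldogs","tigers","wildcats","cougars","lions","bears","wolfpack","cardinals","raiders",
   "hawks","eagles","owls","broncos","spartans","gators","rams","badgers","crimson tide","orange",
   "rebels","aggies","aztecs","shockers","sun devils","demon deacons","blue devils","tar heels",
   "seminoles","longhorns","horned frogs","mountaineers","golden gophers","golden bears","golden eagles"]

-- _MASCOT_MAXLEN = max(map(len, _MASCOT_COMMON)) (max over ints: order-independent)
def pvMascotMaxLen : Int :=
  match PySem.List.max? (pvMascots.map (fun m => PySem.Str.len m)) (fun x => x) with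
  | some v => v
  | none => 0  -- unreachable: the set literal is nonempty (Python max would raise on an empty one)

-- ===== PORT A =====
-- for masc in sorted(_MASCOT_COMMON, key=len, reverse=True): the result is a set, so it does
-- not depend on the (hash-dependent) tie order; we sort the set's insertion-order elements.
def strip_mascot_py (tokens : List String) : List String :=
  let out : PySem.Set String := PySem.Set.empty
  let joined : String := PySem.Str.join " " tokens
  let out := (PySem.List.sorted pvMascots (fun m => PySem.Str.len m) true).foldl
    (fun out masc =>
      if PySem.Str.endswith joined (" " ++ masc) || joined == masc then
        let core := PySem.Str.strip (PySem.Str.slice joined none (some (-(PySem.Str.len masc))))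
        if core ≠ "" then PySem.Set.add out core else out
      else out) out
  -- if tokens and tokens[-1] in _MASCOT_COMMON:
  match PySem.List.pyGet? tokens (-1) with
  | some last =>
      if PySem.Set.contains pvMascots last then
        PySem.Set.add out (PySem.Str.join " " (PySem.List.slice tokens none (some (-1))))
      else out
  | none => out

-- ===== PORT B =====
def strip_mascot_py_alt (tokens : List String) : List String :=
  let out : PySem.Set String := PySem.Set.empty
  let joined : String := PySem.Str.join " " tokens
  let n := PySem.Str.len joined
  let out := (PySem.List.pyRange 0 n 1).foldl
    (fun out p =>
      -- joined[p] == " " and n-p-1 <= _MASCOT_MAXLEN and joined[p+1:] in _MASCOT_COMMON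
      -- (p in range(n), so joined[p] cannot raise)
      if PySem.Str.pyGet? joined p == some ' '
          && decide (n - p - 1 ≤ pvMascotMaxLen)
          && PySem.Set.contains pvMascots (PySem.Str.slice joined (some (p + 1)) none) then
        let core := PySem.Str.strip (PySem.Str.slice joined none (some (p + 1)))
        if core ≠ "" then PySem.Set.add out core else out
      else out) out
  match PySem.List.pyGet? tokens (-1) with
  | some last =>
      if PySem.Set.contains pvMascots last then
        PySem.Set.add out (PySem.Str.join " " (PySem.List.slice tokens none (some (-1))))
      else out
  | none => out

-- ===== PRECONDITION & SPEC =====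
def Spec_strip_mascot_py (tokens : List String) (out : List String) : Prop := out = strip_mascot_py_alt tokens
instance (tokens : List String) (out : List String) : Decidable (Spec_strip_mascot_py tokens out) := by unfold Spec_strip_mascot_py; infer_instance

-- ===== CLAIM (what is proved, stated in full; the proofs are below) =====
def Claim_equal_strip_mascot_py : Prop := ∀ (tokens : List String), Dom_strip_mascot_py tokens → Spec_strip_mascot_py tokens (strip_mascot_py tokens)

-- ===== LEMMAS AND PROOFS =====

lemma pv_str_ext {a b : String} (h : a.toList = b.toList) : a = b := by
  have := congrArg String.ofList h
  simpa [String.ofList_toList] using this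

lemma pv_mascot_ne : ∀ m ∈ pvMascots, m.toList ≠ [] := by
  have h : pvMascots.all (fun m => decide (m.toList ≠ [])) = true := by decide
  intro m hm
  simpa using List.all_eq_true.mp h m hm

-- endswith " "+m as a suffix statement
lemma pv_condE_iff (joined m : String) :
    PySem.Str.endswith joined (" " ++ m) = true ↔ (' ' :: m.toList) <:+ joined.toList := by
  have h : (" " ++ m).toList = ' ' :: m.toList := by
    simp
  simp [PySem.Str.endswith, h, PySem.Chars.endswith, List.isSuffixOf_iff_suffix]

def pvToP (joined m : String) : Nat := joined.toList.length - 1 - m.toList.length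

def pvCondB (joined : String) (k : Nat) : Bool :=
  (PySem.Str.pyGet? joined (k : Int) == some ' ')
    && PySem.Set.contains pvMascots (PySem.Str.slice joined (some ((k : Int) + 1)) none)

lemma pv_condB_iff (joined : String) (k : Nat) :
    pvCondB joined k = true ↔
      joined.toList[k]? = some ' ' ∧
        ∃ m ∈ pvMascots, m.toList = joined.toList.drop (k + 1) := by
  unfold pvCondB
  rw [Bool.and_eq_true, beq_iff_eq]
  constructor
  · rintro ⟨h1, h2⟩
    refine ⟨by simpa [PySem.Str.pyGet?, PySem.List.pyGet?_natCast] using h1, ?_⟩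
    rw [PySem.Set.contains_iff] at h2
    refine ⟨_, h2, ?_⟩
    have : (PySem.Str.slice joined (some ((k : Int) + 1)) none).toList
        = joined.toList.drop (k + 1) := by
      have hc : ((k : Int) + 1) = ((k + 1 : Nat) : Int) := by push_cast; ring
      rw [PySem.Str.slice, String.toList_ofList, hc, PySem.Chars.slice]
      exact PySem.List.slice_from_natCast _ _
    rw [this]
  · rintro ⟨h1, m, hm, hms⟩
    constructor
    · simpa [PySem.Str.pyGet?, PySem.List.pyGet?_natCast] using h1
    · rw [PySem.Set.contains_iff]
      have : PySem.Str.slice joined (some ((k : Int) + 1)) none = m := by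
        apply pv_str_ext
        have hc : ((k : Int) + 1) = ((k + 1 : Nat) : Int) := by push_cast; ring
        rw [PySem.Str.slice, String.toList_ofList, hc, PySem.Chars.slice,
          PySem.List.slice_from_natCast, hms]
      rw [this]; exact hm

def pvSorted : List String := PySem.List.sorted pvMascots (fun m => PySem.Str.len m) true

lemma pv_suffix_facts {joined m : String} (h : (' ' :: m.toList) <:+ joined.toList) :
    m.toList.length + 1 ≤ joined.toList.length ∧
      joined.toList[pvToP joined m]? = some ' ' ∧
      joined.toList.drop (pvToP joined m + 1) = m.toList := by
  have hlen : m.toList.length + 1 ≤ joined.toList.length := by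
    simpa using h.length_le
  have hdrop : joined.toList.drop (joined.toList.length - (m.toList.length + 1))
      = ' ' :: m.toList := by
    have := List.suffix_iff_eq_drop.mp h
    simpa using this.symm
  have hx : joined.toList.length - (m.toList.length + 1) = pvToP joined m := by
    unfold pvToP; omega
  rw [hx] at hdrop
  have hxlt : pvToP joined m < joined.toList.length := by
    unfold pvToP; omega
  have hcons := List.drop_eq_getElem_cons (l := joined.toList) hxlt
  rw [hcons] at hdrop
  refine ⟨hlen, ?_, ?_⟩
  · rw [List.getElem?_eq_getElem hxlt]
    exact congrArg some (List.head_eq_of_cons_eq hdrop)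
  · exact List.tail_eq_of_cons_eq hdrop

lemma pv_memA (joined : String) (x : Nat) :
    x ∈ (pvSorted.filter (fun m => PySem.Str.endswith joined (" " ++ m))).map (pvToP joined)
      ↔ x < joined.toList.length ∧ joined.toList[x]? = some ' ' ∧
          ∃ m ∈ pvMascots, m.toList = joined.toList.drop (x + 1) := by
  rw [List.mem_map]
  constructor
  · rintro ⟨m, hm, rfl⟩
    rw [List.mem_filter] at hm
    obtain ⟨hmem, hcond⟩ := hm
    have hsuf := (pv_condE_iff joined m).mp hcond
    obtain ⟨hlen, hget, hdrop⟩ := pv_suffix_facts hsuf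
    refine ⟨by unfold pvToP; omega, hget, m, ?_, hdrop.symm⟩
    exact (PySem.List.mem_sorted _ _ _ _).mp hmem
  · rintro ⟨hx, hget, m, hm, hms⟩
    refine ⟨m, ?_, ?_⟩
    · rw [List.mem_filter]
      refine ⟨(PySem.List.mem_sorted _ _ _ _).mpr hm, ?_⟩
      rw [pv_condE_iff]
      have hcons := List.drop_eq_getElem_cons (l := joined.toList) hx
      have hgx : joined.toList[x] = ' ' := by
        rw [List.getElem?_eq_getElem hx] at hget
        exact Option.some.inj hget
      rw [hgx, ← hms] at hcons
      rw [← hcons]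
      exact List.drop_suffix x joined.toList
    · have : m.toList.length = joined.toList.length - (x + 1) := by
        rw [hms]; simp
      unfold pvToP; omega

lemma pv_pairwiseA (joined : String) :
    List.Pairwise (· < ·)
      ((pvSorted.filter (fun m => PySem.Str.endswith joined (" " ++ m))).map (pvToP joined)) := by
  rw [List.pairwise_map]
  have hlen : List.Pairwise (fun a b => PySem.Str.len b ≤ PySem.Str.len a) pvSorted :=
    PySem.List.sorted_pairwise_rev _ _
  have hnd : pvSorted.Nodup := by
    have hperm : pvSorted.Perm pvMascots := PySem.List.sorted_perm _ _ _
    exact (List.Perm.nodup_iff hperm).mpr (PySem.Set.nodup_ofList _)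
  have hcomb := (hlen.and hnd).filter (fun m => PySem.Str.endswith joined (" " ++ m))
  refine hcomb.imp_of_mem ?_
  intro a b ha hb hab
  rw [List.mem_filter] at ha hb
  have hsa := (pv_condE_iff joined a).mp ha.2
  have hsb := (pv_condE_iff joined b).mp hb.2
  obtain ⟨hla, _, hda⟩ := pv_suffix_facts hsa
  obtain ⟨hlb, _, hdb⟩ := pv_suffix_facts hsb
  have hle : b.toList.length ≤ a.toList.length := by
    have h1 := hab.1
    simp only [PySem.Str.len] at h1
    exact_mod_cast h1
  have hne : a.toList.length ≠ b.toList.length := by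
    intro hEq
    apply hab.2
    apply pv_str_ext
    have : pvToP joined a = pvToP joined b := by unfold pvToP; omega
    rw [← hda, ← hdb, this]
  unfold pvToP
  omega

lemma pv_key (joined : String) :
    (pvSorted.filter (fun m => PySem.Str.endswith joined (" " ++ m))).map (pvToP joined)
      = (List.range joined.toList.length).filter (pvCondB joined) := by
  have hA := pv_pairwiseA joined
  have hB : List.Pairwise (· < ·)
      ((List.range joined.toList.length).filter (pvCondB joined)) :=
    List.pairwise_lt_range.filter _
  have hndA : ((pvSorted.filter (fun m => PySem.Str.endswith joined (" " ++ m))).map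
      (pvToP joined)).Nodup := hA.imp (fun h => Nat.ne_of_lt h)
  have hndB : ((List.range joined.toList.length).filter (pvCondB joined)).Nodup :=
    List.Nodup.filter _ (List.nodup_range)
  have hmem : ∀ x, x ∈ (pvSorted.filter
        (fun m => PySem.Str.endswith joined (" " ++ m))).map (pvToP joined)
      ↔ x ∈ (List.range joined.toList.length).filter (pvCondB joined) := by
    intro x
    rw [pv_memA, List.mem_filter, List.mem_range, pv_condB_iff]
  have hperm := (List.perm_ext_iff_of_nodup hndA hndB).mpr hmem
  exact List.Perm.eq_of_pairwise
    (fun a b _ _ h1 h2 => absurd (Nat.lt_trans h1 h2) (lt_irrefl a)) hA hB hperm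

def pvCore (joined : String) (k : Nat) : String :=
  PySem.Str.strip (PySem.Str.slice joined none (some ((k : Int) + 1)))

lemma pv_core_eq (joined m : String) (hne : m.toList ≠ [])
    (hcond : PySem.Str.endswith joined (" " ++ m) = true) :
    PySem.Str.strip (PySem.Str.slice joined none (some (-(PySem.Str.len m))))
      = pvCore joined (pvToP joined m) := by
  have hsuf := (pv_condE_iff joined m).mp hcond
  have hlen : m.toList.length + 1 ≤ joined.toList.length := by
    simpa using hsuf.length_le
  have hL : 0 < m.toList.length := List.length_pos_iff.mpr hne
  apply pv_str_ext
  have hs : (PySem.Str.slice joined none (some (-(PySem.Str.len m)))).toList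
      = (PySem.Str.slice joined none (some ((pvToP joined m : Int) + 1))).toList := by
    rw [PySem.Str.slice, PySem.Str.slice, String.toList_ofList, String.toList_ofList,
      PySem.Chars.slice, PySem.Chars.slice]
    have h1 : PySem.Str.len m = (m.toList.length : Int) := rfl
    rw [h1, PySem.List.slice_to_neg_natCast _ _ hL]
    have h2 : ((pvToP joined m : Int) + 1) = ((pvToP joined m + 1 : Nat) : Int) := by
      push_cast; ring
    rw [h2, PySem.List.slice_to_natCast]
    have h3 : joined.toList.length - m.toList.length = pvToP joined m + 1 := by
      unfold pvToP; omega
    rw [h3]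
  rw [PySem.Str.toList_strip, pvCore, PySem.Str.toList_strip, hs]

lemma pv_fold_shape {α : Type} (l : List α) (p : α → Bool) (g : α → String)
    (out0 : PySem.Set String) :
    l.foldl (fun out x =>
        if p x then (if g x ≠ "" then PySem.Set.add out (g x) else out) else out) out0
      = (((l.filter p).map g).filter (fun c => decide (c ≠ ""))).foldl PySem.Set.add out0 := by
  induction l generalizing out0 with
  | nil => rfl
  | cons x t ih =>
    rw [List.foldl_cons, List.filter_cons]
    by_cases hp : p x
    · rw [if_pos hp, if_pos hp, List.map_cons, List.filter_cons]
      by_cases hg : g x = ""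
      · rw [if_neg (by simpa using hg), if_neg (by simpa using hg), ih]
      · rw [if_pos (by simpa using hg), if_pos (by simpa using hg), List.foldl_cons, ih]
    · have hp' : ¬ (p x = true) := hp
      rw [if_neg hp', if_neg hp', ih]

lemma pv_gA_empty (joined m : String) (hm : m ∈ pvMascots) (hq : joined = m) :
    PySem.Str.strip (PySem.Str.slice joined none (some (-(PySem.Str.len m)))) = "" := by
  have hL : 0 < m.toList.length := List.length_pos_iff.mpr (pv_mascot_ne m hm)
  apply pv_str_ext
  rw [PySem.Str.toList_strip]
  have hs : (PySem.Str.slice joined none (some (-(PySem.Str.len m)))).toList = [] := by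
    rw [PySem.Str.slice, String.toList_ofList, PySem.Chars.slice]
    have h1 : PySem.Str.len m = (m.toList.length : Int) := rfl
    rw [h1, PySem.List.slice_to_neg_natCast _ _ hL, hq]
    simp
  rw [hs]
  rfl

lemma pv_dropEq (joined : String) :
    ((pvSorted.filter (fun m => PySem.Str.endswith joined (" " ++ m) || joined == m)).map
        (fun m => PySem.Str.strip (PySem.Str.slice joined none (some (-(PySem.Str.len m)))))).filter
      (fun c => decide (c ≠ ""))
    = ((pvSorted.filter (fun m => PySem.Str.endswith joined (" " ++ m))).map
        (fun m => PySem.Str.strip (PySem.Str.slice joined none (some (-(PySem.Str.len m)))))).filter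
      (fun c => decide (c ≠ "")) := by
  simp only [List.filter_map, List.filter_filter]
  rw [List.filter_congr (p := fun m =>
      (((fun c => decide (c ≠ "")) ∘ fun m =>
          PySem.Str.strip (PySem.Str.slice joined none (some (-(PySem.Str.len m))))) m
        && (PySem.Str.endswith joined (" " ++ m) || joined == m)))]
  intro m hmem
  by_cases hE : PySem.Str.endswith joined (" " ++ m) = true
  · rw [hE, Bool.true_or]
  · have hE' : PySem.Str.endswith joined (" " ++ m) = false := by
      simpa using hE
    rw [hE', Bool.false_or]
    by_cases hq : (joined == m) = true
    · have hqe : joined = m := by simpa using hq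
      have hmm : m ∈ pvMascots := (PySem.List.mem_sorted _ _ _ _).mp hmem
      have hzero : (((fun c => decide (c ≠ "")) ∘ fun m =>
          PySem.Str.strip (PySem.Str.slice joined none (some (-(PySem.Str.len m))))) m) = false := by
        simp only [Function.comp_apply, pv_gA_empty joined m hmm hqe]
        decide
      rw [hzero, Bool.false_and, Bool.false_and]
    · have hq' : (joined == m) = false := by simpa using hq
      rw [hq', Bool.and_false]

lemma pv_mapEq (joined : String) :
    (pvSorted.filter (fun m => PySem.Str.endswith joined (" " ++ m))).map
        (fun m => PySem.Str.strip (PySem.Str.slice joined none (some (-(PySem.Str.len m)))))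
    = ((List.range joined.toList.length).filter (pvCondB joined)).map (pvCore joined) := by
  rw [← pv_key, List.map_map]
  apply List.map_congr_left
  intro m hmem
  rw [List.mem_filter] at hmem
  have hmm : m ∈ pvMascots := (PySem.List.mem_sorted _ _ _ _).mp hmem.1
  exact pv_core_eq joined m (pv_mascot_ne m hmm) hmem.2

lemma pv_listA (joined : String) :
    ((pvSorted.filter (fun m => PySem.Str.endswith joined (" " ++ m) || joined == m)).map
        (fun m => PySem.Str.strip (PySem.Str.slice joined none (some (-(PySem.Str.len m)))))).filter
      (fun c => decide (c ≠ ""))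
    = (((List.range joined.toList.length).filter (pvCondB joined)).map
        (pvCore joined)).filter (fun c => decide (c ≠ "")) := by
  rw [pv_dropEq, pv_mapEq]

lemma pv_mascot_len_le : ∀ m ∈ pvMascots, PySem.Str.len m ≤ pvMascotMaxLen := by
  have h : pvMascots.all (fun m => decide (PySem.Str.len m ≤ pvMascotMaxLen)) = true := by decide
  intro m hm
  simpa using List.all_eq_true.mp h m hm

-- if the trailing substring after position k is a mascot, the max-length guard holds
lemma pv_guard_of_contains (joined : String) (k : Nat)
    (hc : PySem.Set.contains pvMascots
      (PySem.Str.slice joined (some ((k : Int) + 1)) none) = true) :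
    decide (PySem.Str.len joined - (k : Int) - 1 ≤ pvMascotMaxLen) = true := by
  rw [PySem.Set.contains_iff] at hc
  have hts : (PySem.Str.slice joined (some ((k : Int) + 1)) none).toList
      = joined.toList.drop (k + 1) := by
    have hcast : ((k : Int) + 1) = ((k + 1 : Nat) : Int) := by push_cast; ring
    rw [PySem.Str.slice, String.toList_ofList, hcast, PySem.Chars.slice]
    exact PySem.List.slice_from_natCast _ _
  have hne := pv_mascot_ne _ hc
  rw [hts] at hne
  have hlt : k + 1 < joined.toList.length := by
    by_contra h
    exact hne (List.drop_eq_nil_of_le (by omega))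
  have hlen := pv_mascot_len_le _ hc
  have hlen' : ((joined.toList.drop (k + 1)).length : Int) ≤ pvMascotMaxLen := by
    rw [← hts]; exact hlen
  rw [List.length_drop] at hlen'
  have hn : PySem.Str.len joined = (joined.toList.length : Int) := rfl
  rw [decide_eq_true_eq, hn]
  omega

lemma pv_listB (joined : String) :
    ((PySem.List.pyRange 0 (PySem.Str.len joined) 1).filter
        (fun p => PySem.Str.pyGet? joined p == some ' '
          && decide (PySem.Str.len joined - p - 1 ≤ pvMascotMaxLen)
          && PySem.Set.contains pvMascots (PySem.Str.slice joined (some (p + 1)) none))).map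
      (fun p => PySem.Str.strip (PySem.Str.slice joined none (some (p + 1))))
    = ((List.range joined.toList.length).filter (pvCondB joined)).map (pvCore joined) := by
  rw [PySem.List.pyRange_one]
  have h0 : (PySem.Str.len joined - 0).toNat = joined.toList.length := by
    simp [PySem.Str.len]
  rw [h0, List.filter_map, List.map_map]
  have h1 : ∀ k ∈ List.range joined.toList.length,
      ((fun p => PySem.Str.pyGet? joined p == some ' '
          && decide (PySem.Str.len joined - p - 1 ≤ pvMascotMaxLen)
          && PySem.Set.contains pvMascots (PySem.Str.slice joined (some (p + 1)) none))
        ∘ (fun k : Nat => (0 : Int) + ↑k)) k = pvCondB joined k := by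
    intro k _
    simp only [Function.comp_apply, zero_add]
    by_cases hc : PySem.Set.contains pvMascots
        (PySem.Str.slice joined (some ((k : Int) + 1)) none) = true
    · unfold pvCondB
      rw [hc, pv_guard_of_contains joined k hc, Bool.and_true, Bool.and_true]
    · have hc' : PySem.Set.contains pvMascots
          (PySem.Str.slice joined (some ((k : Int) + 1)) none) = false := by
        simpa using hc
      rw [hc', Bool.and_false]
      unfold pvCondB
      rw [hc', Bool.and_false]
  rw [List.filter_congr h1]
  apply List.map_congr_left
  intro k _
  simp only [Function.comp_apply, zero_add]
  rfl

lemma pv_fold_eq (joined : String) (out0 : PySem.Set String) :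
    (PySem.List.sorted pvMascots (fun m => PySem.Str.len m) true).foldl
      (fun out masc =>
        if PySem.Str.endswith joined (" " ++ masc) || joined == masc then
          let core := PySem.Str.strip (PySem.Str.slice joined none (some (-(PySem.Str.len masc))))
          if core ≠ "" then PySem.Set.add out core else out
        else out) out0
    = (PySem.List.pyRange 0 (PySem.Str.len joined) 1).foldl
      (fun out p =>
        if PySem.Str.pyGet? joined p == some ' '
            && decide (PySem.Str.len joined - p - 1 ≤ pvMascotMaxLen)
            && PySem.Set.contains pvMascots (PySem.Str.slice joined (some (p + 1)) none) then
          let core := PySem.Str.strip (PySem.Str.slice joined none (some (p + 1)))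
          if core ≠ "" then PySem.Set.add out core else out
        else out) out0 := by
  show
    pvSorted.foldl
      (fun out masc =>
        if (fun m => PySem.Str.endswith joined (" " ++ m) || joined == m) masc then
          (if (fun m => PySem.Str.strip (PySem.Str.slice joined none (some (-(PySem.Str.len m))))) masc ≠ ""
            then PySem.Set.add out ((fun m => PySem.Str.strip (PySem.Str.slice joined none (some (-(PySem.Str.len m))))) masc)
            else out)
        else out) out0
    = (PySem.List.pyRange 0 (PySem.Str.len joined) 1).foldl
      (fun out p =>
        if (fun p => PySem.Str.pyGet? joined p == some ' '
            && decide (PySem.Str.len joined - p - 1 ≤ pvMascotMaxLen)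
            && PySem.Set.contains pvMascots (PySem.Str.slice joined (some (p + 1)) none)) p then
          (if (fun p => PySem.Str.strip (PySem.Str.slice joined none (some (p + 1)))) p ≠ ""
            then PySem.Set.add out ((fun p => PySem.Str.strip (PySem.Str.slice joined none (some (p + 1)))) p)
            else out)
        else out) out0
  rw [pv_fold_shape, pv_fold_shape, pv_listA, pv_listB]

-- ===== VERDICT (by name: the statement is the Claim_ definition above) =====
theorem strip_mascot_py_spec : Claim_equal_strip_mascot_py := by
  intro tokens _
  unfold Spec_strip_mascot_py strip_mascot_py strip_mascot_py_alt
  simp only [pv_fold_eq]
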